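-- pv_equiv track=rewrite | github.com/sobakaubivakaa/7-8 | 7prac.py | divByTheirD
-- ===== SOURCE A (Python) =====
-- def divByTheirD(n):
--     ans = []
--     for i in range(1,n+1):
--         s = str(i)
--         temp = True
--         for j in s:
--             if int(j) == 0:
--                 temp = False
--             elif i % int(j) != 0:
--                 temp = False
--         if temp:
--             ans.append(i)
--     return ans
-- ===== SOURCE B (Python) =====
-- def divByTheirD(n):
--     # Per number: one digit scan accumulating the lcm of its digits (0 short-circuits),
--     # then a single modulo test i % lcm == 0, instead of one modulo per digit.
--     def _gcd(a, b):
--         while b: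
--             a, b = b, a % b
--         return a
--
--     def _digit_lcm(i):
--         l = 1
--         for c in str(i):
--             d = ord(c) - 48
--             if d == 0:
--                 return 0
--             l = l * d // _gcd(l, d)
--         return l
--
--     return [i for i in range(1, n + 1) if (l := _digit_lcm(i)) != 0 and i % l == 0]
-- ===== Notes on version B (the rewrite author's own statement) =====
-- stated objective: alternative
-- what changed: Instead of testing i's divisibility digit-by-digit with one modulo per digit, B scans the digits once accumulating the lcm of the digits (short-circuiting when a zero digit appears) and keeps i after a single modulo test against that lcm, building the result as a filtered comprehension.
import Mathlib
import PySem

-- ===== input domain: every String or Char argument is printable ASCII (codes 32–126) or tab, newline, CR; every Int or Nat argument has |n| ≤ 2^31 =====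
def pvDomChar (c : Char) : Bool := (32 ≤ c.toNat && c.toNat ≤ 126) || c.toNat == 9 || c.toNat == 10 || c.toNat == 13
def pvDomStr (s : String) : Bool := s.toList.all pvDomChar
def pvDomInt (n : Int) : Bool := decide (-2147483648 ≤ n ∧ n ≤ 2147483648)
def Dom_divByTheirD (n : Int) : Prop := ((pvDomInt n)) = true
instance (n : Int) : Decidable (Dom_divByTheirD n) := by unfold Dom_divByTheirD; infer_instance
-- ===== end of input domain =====

-- B replaces the per-digit divisibility tests by one running lcm of the digits and a single
-- modulo per number (alternative decomposition; exact same output).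

-- ===== PORT A =====
def divByTheirD (n : Int) : List Int :=
  (PySem.List.pyRange 1 (n + 1) 1).foldl
    (fun ans i =>
      if (PySem.Int.toChars i).foldl
          (fun temp j =>
            -- int(j): the .getD default is unreachable, every char of str(i) is a decimal digit
            if (PySem.Int.ofChars? [j]).getD 0 = 0 then false
            else if PySem.Int.mod i ((PySem.Int.ofChars? [j]).getD 0) ≠ 0 then false
            else temp) true
      then ans ++ [i] else ans) []

-- ===== PORT B =====
-- while b: a, b = b, a % b
def pvGcd (a b : Int) : Int :=
  if h : b = 0 then a else pvGcd b (PySem.Int.mod a b)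
termination_by b.natAbs
decreasing_by
  rcases lt_trichotomy b 0 with hb | hb | hb
  · have h2 := PySem.Int.mod_neg_bounds a hb
    omega
  · exact absurd hb h
  · have h1 := PySem.Int.mod_nonneg a hb
    have h2 := PySem.Int.mod_lt a hb
    omega

-- the 'for c in str(i)' loop of _digit_lcm (early return 0 on a zero digit)
def pvDigitLcmGo : List Char → Int → Int
  | [], l => l
  | c :: cs, l =>
    if ((c.toNat : Int) - 48) = 0 then 0
    else pvDigitLcmGo cs (PySem.Int.floordiv (l * ((c.toNat : Int) - 48)) (pvGcd l ((c.toNat : Int) - 48)))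

def pvDigitLcm (i : Int) : Int := pvDigitLcmGo (PySem.Int.toChars i) 1

def divByTheirD_alt (n : Int) : List Int :=
  (PySem.List.pyRange 1 (n + 1) 1).filter
    (fun i => decide (pvDigitLcm i ≠ 0) && decide (PySem.Int.mod i (pvDigitLcm i) = 0))

-- ===== PRECONDITION & SPEC =====
def Spec_divByTheirD (n : Int) (out : List Int) : Prop := out = divByTheirD_alt n
instance (n : Int) (out : List Int) : Decidable (Spec_divByTheirD n out) := by unfold Spec_divByTheirD; infer_instance

-- ===== CLAIM (what is proved, stated in full; the proofs are below) =====
def Claim_equal_divByTheirD : Prop := ∀ (n : Int), Dom_divByTheirD n → Spec_divByTheirD n (divByTheirD n)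

-- ===== LEMMAS AND PROOFS =====

-- every char produced by Nat.toDigitsCore is a decimal digit char (or came from the accumulator)
theorem pvToDigitsCore_digits (f : Nat) : ∀ (m : Nat) (acc : List Char), ∀ c ∈ Nat.toDigitsCore 10 f m acc,
    c ∈ acc ∨ ∃ k, k < 10 ∧ c = Nat.digitChar k := by
  induction f with
  | zero => intro m acc c hc; exact Or.inl hc
  | succ f ih =>
    intro m acc c hc
    simp only [Nat.toDigitsCore] at hc
    split at hc
    · rcases List.mem_cons.mp hc with h | h
      · exact Or.inr ⟨m % 10, Nat.mod_lt _ (by norm_num), h⟩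
      · exact Or.inl h
    · rcases ih _ _ c hc with h | h
      · rcases List.mem_cons.mp h with h' | h'
        · exact Or.inr ⟨m % 10, Nat.mod_lt _ (by norm_num), h'⟩
        · exact Or.inl h'
      · exact Or.inr h

theorem pvToChars_digits (i : Int) (hi : 0 ≤ i) :
    ∀ c ∈ PySem.Int.toChars i, ∃ k, k < 10 ∧ c = Nat.digitChar k := by
  intro c hc
  unfold PySem.Int.toChars at hc
  rw [if_neg (by omega)] at hc
  unfold Nat.toDigits at hc
  rcases pvToDigitsCore_digits _ _ _ c hc with h | h
  · simp at h
  · exact h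

theorem pvDigit_vals (k : Nat) (hk : k < 10) :
    (PySem.Int.ofChars? [Nat.digitChar k]).getD 0 = (k : Int) ∧
      ((Nat.digitChar k).toNat : Int) - 48 = (k : Int) := by
  interval_cases k <;> exact ⟨by decide, by decide⟩

theorem pvGcd_eq_aux : ∀ (N : Nat) (a b : Int), b.natAbs ≤ N → 0 ≤ a → 0 ≤ b →
    pvGcd a b = (Int.gcd a b : Int) := by
  intro N
  induction N with
  | zero =>
    intro a b hN ha hb
    have hb0 : b = 0 := by omega
    subst hb0
    rw [pvGcd]
    simp [Int.gcd, Int.natAbs_of_nonneg ha]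
  | succ N ih =>
    intro a b hN ha hb
    rw [pvGcd]
    split
    · rename_i hb0
      subst hb0
      simp [Int.gcd, Int.natAbs_of_nonneg ha]
    · rename_i hb0
      have hbpos : 0 < b := by omega
      have h1 := PySem.Int.mod_nonneg a hbpos
      have h2 := PySem.Int.mod_lt a hbpos
      rw [ih b (PySem.Int.mod a b) (by omega) hb h1]
      rw [PySem.Int.mod_eq_emod_of_pos hbpos]
      -- Int.gcd b (a % b) = Int.gcd a b
      congr 1
      have hmod : (a % b).natAbs = a.natAbs % b.natAbs := by
        have h := Int.natAbs_emod a (show b ≠ 0 from hb0)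
        rwa [if_pos (Or.inl ha)] at h
      unfold Int.gcd
      rw [hmod, Nat.gcd_comm b.natAbs, ← Nat.gcd_rec, Nat.gcd_comm]

theorem pvGcd_eq (a b : Int) (ha : 0 ≤ a) (hb : 0 ≤ b) : pvGcd a b = (Int.gcd a b : Int) :=
  pvGcd_eq_aux b.natAbs a b le_rfl ha hb

theorem pvLcm_step (l d : Int) (hl : 1 ≤ l) (hd : 1 ≤ d) :
    PySem.Int.floordiv (l * d) (pvGcd l d) = (Int.lcm l d : Int) := by
  rw [pvGcd_eq l d (by omega) (by omega)]
  have hg : 0 < Int.gcd l d := by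
    rcases Nat.eq_zero_or_pos (Int.gcd l d) with h | h
    · exfalso; have := Int.gcd_eq_zero_iff.mp h; omega
    · exact h
  rw [PySem.Int.floordiv_eq_ediv_of_pos (by exact_mod_cast hg)]
  have hld : l * d = ((l.natAbs * d.natAbs : Nat) : Int) := by
    rw [Nat.cast_mul, Int.natAbs_of_nonneg (show (0:Int) ≤ l by omega),
      Int.natAbs_of_nonneg (show (0:Int) ≤ d by omega)]
  rw [hld]
  rw [← Int.natCast_div]
  have hml : l.natAbs * d.natAbs / Int.gcd l d = Int.lcm l d := by
    have h := Nat.gcd_mul_lcm l.natAbs d.natAbs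
    unfold Int.gcd Int.lcm
    unfold Int.gcd at hg
    rw [← h, Nat.mul_div_cancel_left _ hg]
  rw [hml]

theorem pvGo_spec (i : Int) : ∀ (cs : List Char), ∀ (l : Int), 1 ≤ l →
    (∀ c ∈ cs, ∃ k, k < 10 ∧ c = Nat.digitChar k) →
    ((pvDigitLcmGo cs l ≠ 0 ∧ pvDigitLcmGo cs l ∣ i) ↔
      (l ∣ i ∧ ∀ c ∈ cs, ((c.toNat : Int) - 48 ≠ 0 ∧ ((c.toNat : Int) - 48) ∣ i))) := by
  intro cs
  induction cs with
  | nil =>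
    intro l hl _
    simp only [pvDigitLcmGo, List.not_mem_nil, false_implies, implies_true, and_true]
    constructor
    · exact fun h => h.2
    · exact fun h => ⟨by omega, h⟩
  | cons c cs ih =>
    intro l hl hdig
    obtain ⟨k, hk, hck⟩ := hdig c List.mem_cons_self
    have hv := (pvDigit_vals k hk).2
    simp only [pvDigitLcmGo]
    by_cases hd : ((c.toNat : Int) - 48) = 0
    · rw [if_pos hd]
      simp only [ne_eq, not_true_eq_false, false_and, false_iff, not_and]
      intro _ h
      exact absurd (h c List.mem_cons_self).1 (by simp [hd])
    · rw [if_neg hd]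
      have hd1 : 1 ≤ ((c.toNat : Int) - 48) := by
        rw [hck, hv] at hd ⊢
        omega
      rw [pvLcm_step l _ hl hd1]
      have hlcm : 1 ≤ (Int.lcm l ((c.toNat : Int) - 48) : Int) := by
        have : Int.lcm l ((c.toNat : Int) - 48) ≠ 0 := by
          intro h
          rcases Int.lcm_eq_zero_iff.mp h with h' | h' <;> omega
        omega
      rw [ih _ hlcm (fun c' hc' => hdig c' (List.mem_cons_of_mem _ hc'))]
      have hlcmdvd : ((Int.lcm l ((c.toNat : Int) - 48) : Nat) : Int) ∣ i ↔
          (l ∣ i ∧ ((c.toNat : Int) - 48) ∣ i) := by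
        rw [Int.natCast_dvd]
        unfold Int.lcm
        rw [Nat.lcm_dvd_iff, Int.natAbs_dvd_natAbs, Int.natAbs_dvd_natAbs]
      rw [hlcmdvd]
      constructor
      · rintro ⟨⟨hli, hdi⟩, hrest⟩
        exact ⟨hli, fun c' hc' => by
          rcases List.mem_cons.mp hc' with h' | h'
          · subst h'; exact ⟨hd, hdi⟩
          · exact hrest c' h'⟩
      · rintro ⟨hli, hall⟩
        exact ⟨⟨hli, (hall c List.mem_cons_self).2⟩,
          fun c' hc' => hall c' (List.mem_cons_of_mem _ hc')⟩

theorem pvFoldA_spec (i : Int) : ∀ (cs : List Char) (t : Bool),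
    cs.foldl (fun temp j =>
        if (PySem.Int.ofChars? [j]).getD 0 = 0 then false
        else if PySem.Int.mod i ((PySem.Int.ofChars? [j]).getD 0) ≠ 0 then false
        else temp) t
      = (t && cs.all (fun j => decide ((PySem.Int.ofChars? [j]).getD 0 ≠ 0) &&
          decide (PySem.Int.mod i ((PySem.Int.ofChars? [j]).getD 0) = 0))) := by
  intro cs
  induction cs with
  | nil => intro t; simp
  | cons c cs ih =>
    intro t
    simp only [List.foldl_cons, List.all_cons]
    rw [ih]
    by_cases h1 : (PySem.Int.ofChars? [c]).getD 0 = 0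
    · simp [h1]
    · by_cases h2 : PySem.Int.mod i ((PySem.Int.ofChars? [c]).getD 0) = 0
      · simp [h1, h2]
      · simp [h1, h2]

theorem pvPred_eq (i : Int) (hi : 1 ≤ i) :
    ((PySem.Int.toChars i).foldl (fun temp j =>
        if (PySem.Int.ofChars? [j]).getD 0 = 0 then false
        else if PySem.Int.mod i ((PySem.Int.ofChars? [j]).getD 0) ≠ 0 then false
        else temp) true)
      = (decide (pvDigitLcm i ≠ 0) && decide (PySem.Int.mod i (pvDigitLcm i) = 0)) := by
  rw [pvFoldA_spec, Bool.true_and]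
  have hdig := pvToChars_digits i (by omega)
  rw [Bool.eq_iff_iff]
  simp only [List.all_eq_true, Bool.and_eq_true, decide_eq_true_eq]
  constructor
  · intro h
    have : 1 ∣ i ∧ ∀ c ∈ PySem.Int.toChars i,
        ((c.toNat : Int) - 48 ≠ 0 ∧ ((c.toNat : Int) - 48) ∣ i) := by
      refine ⟨one_dvd i, fun c hc => ?_⟩
      obtain ⟨k, hk, hck⟩ := hdig c hc
      obtain ⟨hA, hB⟩ := pvDigit_vals k hk
      obtain ⟨h1, h2⟩ := h c hc
      rw [hck, hA] at h1 h2
      rw [hck, hB]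
      exact ⟨h1, (PySem.Int.mod_eq_zero_iff_dvd i (k : Int)).mp h2⟩
    have := (pvGo_spec i (PySem.Int.toChars i) 1 le_rfl hdig).mpr this
    unfold pvDigitLcm
    exact ⟨this.1, (PySem.Int.mod_eq_zero_iff_dvd _ _).mpr this.2⟩
  · intro h
    have hgo : pvDigitLcmGo (PySem.Int.toChars i) 1 ≠ 0 ∧
        pvDigitLcmGo (PySem.Int.toChars i) 1 ∣ i := by
      unfold pvDigitLcm at h
      exact ⟨h.1, (PySem.Int.mod_eq_zero_iff_dvd _ _).mp h.2⟩
    have := ((pvGo_spec i (PySem.Int.toChars i) 1 le_rfl hdig).mp hgo).2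
    intro c hc
    obtain ⟨k, hk, hck⟩ := hdig c hc
    obtain ⟨hA, hB⟩ := pvDigit_vals k hk
    obtain ⟨h1, h2⟩ := this c hc
    rw [hck, hB] at h1 h2
    rw [hck, hA]
    exact ⟨h1, (PySem.Int.mod_eq_zero_iff_dvd i (k : Int)).mpr h2⟩

-- ===== VERDICT (by name: the statement is the Claim_ definition above) =====
theorem divByTheirD_spec : Claim_equal_divByTheirD := by
  intro n _
  unfold Spec_divByTheirD divByTheirD divByTheirD_alt
  rw [PySem.List.foldl_append_if_eq_filter]
  rw [List.nil_append]
  apply List.filter_congr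
  intro i hi
  have hi1 : 1 ≤ i := (PySem.List.mem_pyRange_one.mp hi).1
  exact pvPred_eq i hi1
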